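-- pv_equiv track=rewrite | github.com/cky332/graphrag-unlearn | delete_community_direct_node_edge.py | gather_all_clusters
-- ===== SOURCE A (Python) =====
-- def gather_all_clusters(initial_ids: list[str], community_reports: dict) -> set[str]:
--     """
--     Starting from initial_ids, traverse 'sub_communities' recursively
--     to collect every related cluster ID.
--     """
--     all_ids = set()
--     def dfs(cid: str):
--         if cid in all_ids:
--             return
--         all_ids.add(cid)
--         for sub in community_reports.get(cid, {}).get("sub_communities", []):
--             dfs(str(sub))
--     for cid in initial_ids:
--         dfs(str(cid))
--     return all_ids
-- ===== SOURCE B (Python) =====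
-- def gather_all_clusters(initial_ids: list[str], community_reports: dict) -> set[str]:
--     """Iterative explicit-stack DFS collecting every cluster reachable via 'sub_communities'."""
--     all_ids = set()
--     stack = [str(cid) for cid in reversed(initial_ids)]
--     while stack:
--         node = stack.pop()
--         if node in all_ids:
--             continue
--         all_ids.add(node)
--         for sub in reversed(community_reports.get(node, {}).get("sub_communities", [])):
--             stack.append(str(sub))
--     return all_ids
-- ===== Notes on version B (the rewrite author's own statement) =====
-- stated objective: alternative
-- what changed: A's recursive closure-based DFS is replaced by an iterative explicit-stack DFS (visited check at pop time, reversed pushes), removing recursion entirely.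
import Mathlib
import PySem

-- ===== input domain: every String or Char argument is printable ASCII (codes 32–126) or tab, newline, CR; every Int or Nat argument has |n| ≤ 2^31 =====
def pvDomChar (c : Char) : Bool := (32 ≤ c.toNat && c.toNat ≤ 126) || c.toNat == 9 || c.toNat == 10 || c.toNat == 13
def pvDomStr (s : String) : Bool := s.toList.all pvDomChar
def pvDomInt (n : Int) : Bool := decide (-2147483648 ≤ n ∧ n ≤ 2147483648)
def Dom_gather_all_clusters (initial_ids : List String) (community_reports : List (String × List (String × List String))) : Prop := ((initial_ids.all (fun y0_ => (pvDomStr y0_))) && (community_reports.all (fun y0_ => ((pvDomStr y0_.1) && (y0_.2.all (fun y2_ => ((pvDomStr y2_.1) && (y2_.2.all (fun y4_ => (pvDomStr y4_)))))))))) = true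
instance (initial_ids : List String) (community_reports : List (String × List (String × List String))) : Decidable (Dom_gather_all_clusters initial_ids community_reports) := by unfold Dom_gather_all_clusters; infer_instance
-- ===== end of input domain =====

-- B replaces A's recursive DFS by an explicit-stack iterative DFS (visited check at pop time,
-- reversed pushes), collecting the same set in the same first-insertion order; objective: alternative.

-- ===== PORT A =====
-- community_reports.get(cid, {}).get("sub_communities", []) (written verbatim in both Pythons)
def pvSubs (cr : List (String × List (String × List String))) (cid : String) : List String :=
  PySem.Dict.getD (PySem.Dict.mk ((PySem.Dict.mk cr).getD cid [])) "sub_communities" []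

-- the distinct keys of community_reports (used only to size A's fuel / B's termination measure)
def pvKeys (cr : List (String × List (String × List String))) : List String :=
  (cr.map Prod.fst).dedup

-- def dfs(cid): if cid in all_ids: return; all_ids.add(cid); for sub in …: dfs(str(sub))
-- str of a str is the identity, so str(sub)/str(cid) are ported as the argument itself.
-- The Nat argument is a totality guard (fuel) only, one unit per nesting level; the recursion
-- depth is bounded by the number of distinct keys + 1, so the fuel chosen below never runs out
-- (that is what the pvBridge proof below establishes).
def pvDfs (cr : List (String × List (String × List String))) :
    Nat → PySem.Set String → String → PySem.Set String
  | 0, v, _ => v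
  | f + 1, v, cid =>
    if cid ∈ v then v
    else (pvSubs cr cid).foldl (fun acc s => pvDfs cr f acc s) (PySem.Set.add v cid)

-- all_ids = set(); for cid in initial_ids: dfs(str(cid)); return all_ids
def gather_all_clusters (initial_ids : List String) (community_reports : List (String × List (String × List String))) : List String :=
  initial_ids.foldl
    (fun v c => pvDfs community_reports ((pvKeys community_reports).length + 1) v c)
    PySem.Set.empty

-- ===== PORT B =====
-- termination measure of B's while loop: pending stack entries + sub-lists not yet expanded
def pvPot (cr : List (String × List (String × List String))) (v : List String) : Nat :=
  (((pvKeys cr).filter (fun k => decide (k ∉ v))).map (fun k => (pvSubs cr k).length)).sum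

-- keys not present in the report dict have no sub-communities (needed by the measure proof)
theorem pvSubs_of_not_mem_keys (cr : List (String × List (String × List String))) (c : String)
    (hc : c ∉ pvKeys cr) : pvSubs cr c = [] := by
  have h1 : (PySem.Dict.mk cr).getD c [] = [] := by
    apply PySem.Dict.getD_of_not_contains
    simp only [PySem.Dict.contains_mk, List.any_eq_false, beq_iff_eq, Prod.forall]
    simp only [pvKeys, List.mem_dedup, List.mem_map] at hc
    intro a b hab e
    exact hc ⟨(a, b), hab, e⟩
  simp [pvSubs, h1]
  rfl

-- popping an unvisited node strictly lowers the measure even after its sub-list is pushed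
theorem pvSumFilter (p q : String → Bool) (f : String → Nat) (c : String)
    (hpc : p c = false) (hqc : q c = true) (heq : ∀ x, x ≠ c → p x = q x) :
    ∀ l : List String, l.Nodup → c ∈ l →
      ((l.filter p).map f).sum + f c = ((l.filter q).map f).sum := by
  intro l
  induction l with
  | nil => intro _ h; cases h
  | cons a t ih =>
    intro hnd hmem
    have hat := (List.nodup_cons.mp hnd).1
    have hndt := (List.nodup_cons.mp hnd).2
    rcases List.mem_cons.mp hmem with rfl | hct
    · have hfeq : t.filter p = t.filter q := by
        apply List.filter_congr
        intro x hx
        exact heq x (fun e => hat (e ▸ hx))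
      simp [hpc, hqc, hfeq]
      omega
    · have := ih hndt hct
      have hac : a ≠ c := fun e => hat (e ▸ hct)
      have hpa : p a = q a := heq a hac
      cases hqa : q a
      · have hpa2 : p a = false := hpa.trans hqa
        simp [hpa2, hqa]
        omega
      · have hpa2 : p a = true := hpa.trans hqa
        simp [hpa2, hqa]
        omega

theorem pvPot_add_le (cr : List (String × List (String × List String))) (v : List String)
    (c : String) (hc : c ∉ v) :
    pvPot cr (PySem.Set.add v c) + (pvSubs cr c).length ≤ pvPot cr v := by
  have hadd : PySem.Set.add v c = v ++ [c] := PySem.Set.add_of_not_mem hc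
  have hpc : (decide (c ∉ v ++ [c])) = false := by simp
  have hqc : (decide (c ∉ v)) = true := by simpa using hc
  have heq : ∀ x, x ≠ c → (decide (x ∉ v ++ [c])) = (decide (x ∉ v)) := by
    intro x hx
    simp [List.mem_append, hx]
  by_cases hk : c ∈ pvKeys cr
  · have := pvSumFilter (fun k => decide (k ∉ v ++ [c])) (fun k => decide (k ∉ v))
      (fun k => (pvSubs cr k).length) c hpc hqc heq (pvKeys cr)
      (by simp [pvKeys]; exact List.nodup_dedup _) hk
    unfold pvPot
    rw [hadd]
    exact Nat.le_of_eq this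
  · have hsub : pvSubs cr c = [] := pvSubs_of_not_mem_keys cr c hk
    have hfeq : (pvKeys cr).filter (fun k => decide (k ∉ v ++ [c]))
        = (pvKeys cr).filter (fun k => decide (k ∉ v)) := by
      apply List.filter_congr
      intro x hx
      exact heq x (fun e => hk (e ▸ hx))
    unfold pvPot
    rw [hadd, hfeq, hsub]
    simp

-- while stack: node = stack.pop(); if node in all_ids: continue; all_ids.add(node);
--              for sub in reversed(…get(node,{}).get("sub_communities",[])): stack.append(str(sub))
-- The Lean list holds the Python stack TOP FIRST: pop() = take the head, and appending the
-- reversed sub-list at the Python end = subs ++ rest here.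
def pvLoop (cr : List (String × List (String × List String))) (v : PySem.Set String)
    (stack : List String) : PySem.Set String :=
  match stack with
  | [] => v
  | c :: rest =>
    if h : c ∈ v then pvLoop cr v rest
    else pvLoop cr (PySem.Set.add v c) (pvSubs cr c ++ rest)
termination_by pvPot cr v + stack.length
decreasing_by
  · simp only [List.length_cons]; omega
  · have := pvPot_add_le cr v c h
    simp only [List.length_append, List.length_cons]; omega

-- stack = [str(cid) for cid in reversed(initial_ids)], so the pop order (top first) is initial_ids
def gather_all_clusters_alt (initial_ids : List String) (community_reports : List (String × List (String × List String))) : List String :=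
  pvLoop community_reports PySem.Set.empty initial_ids

-- ===== PRECONDITION & SPEC =====
def Spec_gather_all_clusters (initial_ids : List String) (community_reports : List (String × List (String × List String))) (out : List String) : Prop := out = gather_all_clusters_alt initial_ids community_reports
instance (initial_ids : List String) (community_reports : List (String × List (String × List String))) (out : List String) : Decidable (Spec_gather_all_clusters initial_ids community_reports out) := by unfold Spec_gather_all_clusters; infer_instance

-- ===== CLAIM (what is proved, stated in full; the proofs are below) =====
def Claim_equal_gather_all_clusters : Prop := ∀ (initial_ids : List String) (community_reports : List (String × List (String × List String))), Dom_gather_all_clusters initial_ids community_reports → Spec_gather_all_clusters initial_ids community_reports (gather_all_clusters initial_ids community_reports)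

-- ===== LEMMAS AND PROOFS =====

-- the number of still-unvisited keys, plus one: an upper bound on A's recursion depth
def pvNeed (cr : List (String × List (String × List String))) (v : List String) : Nat :=
  ((pvKeys cr).filter (fun k => decide (k ∉ v))).length + 1

theorem pvNeed_antitone (cr : List (String × List (String × List String))) (v w : List String)
    (h : ∀ x, x ∈ v → x ∈ w) : pvNeed cr w ≤ pvNeed cr v := by
  unfold pvNeed
  have hsub : List.Sublist ((pvKeys cr).filter (fun k => decide (k ∉ w)))
      ((pvKeys cr).filter (fun k => decide (k ∉ v))) := by
    apply List.monotone_filter_right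
    intro a ha
    simp only [decide_eq_true_eq] at *
    exact fun hv => ha (h a hv)
  have := hsub.length_le
  omega

theorem pvFilterLt (p q : String → Bool) (himp : ∀ x, p x = true → q x = true) (c : String)
    (hpc : p c = false) (hqc : q c = true) :
    ∀ l : List String, c ∈ l → (l.filter p).length < (l.filter q).length := by
  intro l
  induction l with
  | nil => intro h; cases h
  | cons a t ih =>
    intro hmem
    have hlen := (List.monotone_filter_right t himp).length_le
    rcases List.mem_cons.mp hmem with rfl | hct
    · simp [hpc, hqc]; omega
    · have := ih hct
      cases hqa : q a
      · have hpa : p a = false := by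
          cases hpa : p a
          · rfl
          · exact absurd (himp a hpa) (by simp [hqa])
        simp [hpa, hqa]; omega
      · cases hpa : p a <;> simp [hpa, hqa] <;> omega

theorem pvNeed_add_lt (cr : List (String × List (String × List String))) (v : List String)
    (c : String) (hk : c ∈ pvKeys cr) (hv : c ∉ v) :
    pvNeed cr (PySem.Set.add v c) + 1 ≤ pvNeed cr v := by
  have hadd : PySem.Set.add v c = v ++ [c] := PySem.Set.add_of_not_mem hv
  have := pvFilterLt (fun k => decide (k ∉ v ++ [c])) (fun k => decide (k ∉ v))
    (by intro x hx; simp only [decide_eq_true_eq, List.mem_append] at *; tauto) c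
    (by simp) (by simpa using hv) (pvKeys cr) hk
  unfold pvNeed
  rw [hadd]
  omega

-- dfs only ever adds to all_ids
theorem pvFoldlMem (g : PySem.Set String → String → PySem.Set String) (x : String)
    (hstep : ∀ a s, x ∈ a → x ∈ g a s) :
    ∀ (l : List String) (v : PySem.Set String), x ∈ v → x ∈ l.foldl g v := by
  intro l
  induction l with
  | nil => intro v hv; exact hv
  | cons a t ih => intro v hv; exact ih (g v a) (hstep v a hv)

theorem mem_pvDfs_of_mem (cr : List (String × List (String × List String))) :
    ∀ (f : Nat) (v : PySem.Set String) (c x : String), x ∈ v → x ∈ pvDfs cr f v c := by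
  intro f
  induction f with
  | zero => intro v c x hx; exact hx
  | succ g ih =>
    intro v c x hx
    rw [pvDfs]
    by_cases hm : c ∈ v
    · simp [hm, hx]
    · simp only [hm, if_false]
      exact pvFoldlMem (fun acc s => pvDfs cr g acc s) x (fun a s ha => ih a s x ha)
        (pvSubs cr c) (PySem.Set.add v c) (by rw [PySem.Set.mem_add]; exact Or.inl hx)

-- the bridge: one run of B's explicit stack equals A's nested recursive folds, given enough fuel
theorem pvBridge (cr : List (String × List (String × List String))) :
    ∀ (f : Nat) (xs : List String) (v : PySem.Set String) (rest : List String),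
      pvNeed cr v ≤ f →
      pvLoop cr v (xs ++ rest) = pvLoop cr (xs.foldl (fun a s => pvDfs cr f a s) v) rest := by
  intro f
  induction f with
  | zero =>
    intro xs v rest h
    exfalso
    unfold pvNeed at h
    omega
  | succ g ihf =>
    intro xs
    induction xs with
    | nil => intro v rest h; simp
    | cons c xs' ihxs =>
      intro v rest h
      simp only [List.cons_append, List.foldl_cons]
      rw [pvLoop]
      by_cases hm : c ∈ v
      · simp only [hm, dite_true]
        have hd : pvDfs cr (g + 1) v c = v := by rw [pvDfs]; simp [hm]
        rw [hd]
        exact ihxs v rest h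
      · simp only [hm, dite_false]
        have hd : pvDfs cr (g + 1) v c
            = (pvSubs cr c).foldl (fun a s => pvDfs cr g a s) (PySem.Set.add v c) := by
          rw [pvDfs]; simp [hm]
        by_cases hk : c ∈ pvKeys cr
        · have h2 : pvNeed cr (PySem.Set.add v c) ≤ g := by
            have := pvNeed_add_lt cr v c hk hm
            omega
          rw [ihf (pvSubs cr c) (PySem.Set.add v c) (xs' ++ rest) h2, ← hd]
          apply ihxs
          apply le_trans (pvNeed_antitone cr v (pvDfs cr (g + 1) v c) ?_) h
          intro x hx
          exact mem_pvDfs_of_mem cr (g + 1) v c x hx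
        · have hs : pvSubs cr c = [] := pvSubs_of_not_mem_keys cr c hk
          rw [hs] at hd ⊢
          simp only [List.nil_append, List.foldl_nil] at hd ⊢
          rw [← hd]
          apply ihxs
          apply le_trans (pvNeed_antitone cr v (pvDfs cr (g + 1) v c) ?_) h
          intro x hx
          exact mem_pvDfs_of_mem cr (g + 1) v c x hx

-- ===== VERDICT (by name: the statement is the Claim_ definition above) =====
theorem gather_all_clusters_spec : Claim_equal_gather_all_clusters := by
  intro i cr _
  unfold Spec_gather_all_clusters gather_all_clusters gather_all_clusters_alt
  have hneed : pvNeed cr PySem.Set.empty ≤ (pvKeys cr).length + 1 := by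
    unfold pvNeed
    have := (List.filter_sublist (l := pvKeys cr)
      (p := fun k => decide (k ∉ (PySem.Set.empty : PySem.Set String)))).length_le
    omega
  have := pvBridge cr ((pvKeys cr).length + 1) i PySem.Set.empty [] hneed
  rw [List.append_nil] at this
  rw [this, pvLoop]
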